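-- pv_equiv track=rewrite | github.com/pppppptttttt/simple_regex_vm | vm.py | compile_regex
-- ===== SOURCE A (Python) =====
-- def compile_regex(regex):
--     instructions = []
--
--     for char in regex:
--         if char == 'a' or char == 'b':
--             instructions.append(f"char {char}")
--         elif char == '+':
--             if instructions and instructions[-1].startswith("char"):
--                 last_char = instructions.pop()
--                 instructions.append(last_char)
--                 instructions.append(
--                     f"split {len(instructions)-1} {len(instructions)+1}")
--         elif char == '*':
--             if instructions and instructions[-1].startswith('char'):
--                 last_char = instructions.pop()
--                 instructions.append(
--                     f"split {len(instructions)+1} {len(instructions)+3}")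
--                 instructions.append(last_char)
--                 instructions.append(f"jmp {len(instructions)-2}")
--         elif char == '?':
--             if instructions and instructions[-1].startswith("char"):
--                 last_char = instructions.pop()
--                 instructions.append(
--                     f"split {len(instructions)+1} {len(instructions)+2}")
--                 instructions.append(last_char)
--         elif char == '|':
--             if instructions and instructions[-1].startswith("char"):
--                 last_char = instructions.pop()
--                 instructions.append(
--                     f"split {len(instructions)+1} {len(instructions)+3}"
--                 )
--                 instructions.append(last_char)
--                 instructions.append(f"jmp {len(instructions)+2}")
--
--     instructions.append("match")
--     return instructions
-- ===== SOURCE B (Python) =====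
-- def compile_regex(regex):
--     # State machine: keep the most recent char instruction pending instead
--     # of appending and popping it; operators consume/recommit the pending char.
--     out = []
--     pending = None
--     for ch in regex:
--         if ch == 'a' or ch == 'b':
--             if pending is not None:
--                 out.append(pending)
--             pending = f"char {ch}"
--         elif pending is not None:
--             n = len(out)
--             if ch == '+':
--                 out += [pending, f"split {n} {n+2}"]
--                 pending = None
--             elif ch == '*':
--                 out += [f"split {n+1} {n+3}", pending, f"jmp {n}"]
--                 pending = None
--             elif ch == '?':
--                 out.append(f"split {n+1} {n+2}")
--                 # pending char stays pending: it is still the last instruction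
--             elif ch == '|':
--                 out += [f"split {n+1} {n+3}", pending, f"jmp {n+4}"]
--                 pending = None
--     if pending is not None:
--         out.append(pending)
--     out.append("match")
--     return out
-- ===== Notes on version B (the rewrite author's own statement) =====
-- stated objective: alternative
-- what changed: Replaces A's append-then-pop-and-reappend handling of quantifiers (with startswith tests on the list's last element) by a single-pass state machine that keeps the most recent char instruction pending and lets each operator consume or re-commit it; no pop, no string inspection.
import Mathlib
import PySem

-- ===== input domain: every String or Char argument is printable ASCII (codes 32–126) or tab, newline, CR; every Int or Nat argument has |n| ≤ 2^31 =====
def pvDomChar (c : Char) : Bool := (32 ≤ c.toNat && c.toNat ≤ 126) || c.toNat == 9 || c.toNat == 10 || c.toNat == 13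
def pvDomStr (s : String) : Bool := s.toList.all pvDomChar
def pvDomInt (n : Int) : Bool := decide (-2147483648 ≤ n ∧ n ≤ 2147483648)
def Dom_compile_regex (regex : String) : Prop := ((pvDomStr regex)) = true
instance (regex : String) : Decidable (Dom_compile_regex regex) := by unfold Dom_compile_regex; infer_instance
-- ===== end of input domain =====

-- B replaces A's append-then-pop handling of operators by a state machine that
-- keeps the most recent char instruction pending (objective: simpler/alternative decomposition).

-- ===== PORT A =====
-- one iteration of A's for-loop over `regex`
def pvStepA (ins : List String) (c : Char) : List String :=
  if c = 'a' ∨ c = 'b' then ins ++ ["char " ++ String.ofList [c]]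
  else if c = '+' then
    match ins.getLast? with
    | none => ins
    | some t =>
      if PySem.Str.startswith t "char" then
        let body := ins.dropLast              -- last_char = instructions.pop()
        let ins1 := body ++ [t]
        ins1 ++ ["split " ++ PySem.Int.toStr ((ins1.length : Int) - 1) ++ " " ++
                 PySem.Int.toStr ((ins1.length : Int) + 1)]
      else ins
  else if c = '*' then
    match ins.getLast? with
    | none => ins
    | some t =>
      if PySem.Str.startswith t "char" then
        let body := ins.dropLast
        let ins1 := body ++ ["split " ++ PySem.Int.toStr ((body.length : Int) + 1) ++ " " ++
                             PySem.Int.toStr ((body.length : Int) + 3)]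
        let ins2 := ins1 ++ [t]
        ins2 ++ ["jmp " ++ PySem.Int.toStr ((ins2.length : Int) - 2)]
      else ins
  else if c = '?' then
    match ins.getLast? with
    | none => ins
    | some t =>
      if PySem.Str.startswith t "char" then
        let body := ins.dropLast
        let ins1 := body ++ ["split " ++ PySem.Int.toStr ((body.length : Int) + 1) ++ " " ++
                             PySem.Int.toStr ((body.length : Int) + 2)]
        ins1 ++ [t]
      else ins
  else if c = '|' then
    match ins.getLast? with
    | none => ins
    | some t =>
      if PySem.Str.startswith t "char" then
        let body := ins.dropLast
        let ins1 := body ++ ["split " ++ PySem.Int.toStr ((body.length : Int) + 1) ++ " " ++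
                             PySem.Int.toStr ((body.length : Int) + 3)]
        let ins2 := ins1 ++ [t]
        ins2 ++ ["jmp " ++ PySem.Int.toStr ((ins2.length : Int) + 2)]
      else ins
  else ins

def compile_regex (regex : String) : List String :=
  (regex.toList.foldl pvStepA []) ++ ["match"]

-- ===== PORT B =====
-- one iteration of B's for-loop: state is (out, pending char instruction)
def pvStepB (st : List String × Option String) (c : Char) : List String × Option String :=
  let out := st.1
  let pending := st.2
  if c = 'a' ∨ c = 'b' then
    match pending with
    | some p => (out ++ [p], some ("char " ++ String.ofList [c]))
    | none => (out, some ("char " ++ String.ofList [c]))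
  else
    match pending with
    | none => (out, none)
    | some p =>
      let n : Int := out.length
      if c = '+' then
        (out ++ [p, "split " ++ PySem.Int.toStr n ++ " " ++ PySem.Int.toStr (n + 2)], none)
      else if c = '*' then
        (out ++ ["split " ++ PySem.Int.toStr (n + 1) ++ " " ++ PySem.Int.toStr (n + 3), p,
                 "jmp " ++ PySem.Int.toStr n], none)
      else if c = '?' then
        (out ++ ["split " ++ PySem.Int.toStr (n + 1) ++ " " ++ PySem.Int.toStr (n + 2)], some p)
      else if c = '|' then
        (out ++ ["split " ++ PySem.Int.toStr (n + 1) ++ " " ++ PySem.Int.toStr (n + 3), p,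
                 "jmp " ++ PySem.Int.toStr (n + 4)], none)
      else (out, some p)

def compile_regex_alt (regex : String) : List String :=
  let st := regex.toList.foldl pvStepB ([], none)
  (match st.2 with
   | some p => st.1 ++ [p]
   | none => st.1) ++ ["match"]

-- ===== PRECONDITION & SPEC =====
def Spec_compile_regex (regex : String) (out : List String) : Prop := out = compile_regex_alt regex
instance (regex : String) (out : List String) : Decidable (Spec_compile_regex regex out) := by unfold Spec_compile_regex; infer_instance

-- ===== CLAIM (what is proved, stated in full; the proofs are below) =====
def Claim_equal_compile_regex : Prop := ∀ (regex : String), Dom_compile_regex regex → Spec_compile_regex regex (compile_regex regex)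

-- ===== LEMMAS AND PROOFS =====

-- invariant tying A's instruction list to B's (out, pending) state
def pvInv (ins out : List String) (pending : Option String) : Prop :=
  match pending with
  | some p => ins = out ++ [p] ∧ (p = "char a" ∨ p = "char b")
  | none => ins = out ∧ (∀ t, ins.getLast? = some t → PySem.Str.startswith t "char" = false)

-- a string whose first character is not 'c' does not start with "char"
theorem pv_sw_head (s : String) (c0 : Char) (h0 : s.toList.head? = some c0)
    (hne : c0 ≠ 'c') : PySem.Str.startswith s "char" = false := by
  rw [Bool.eq_false_iff]
  intro hsw
  rw [PySem.Str.startswith_eq, PySem.Chars.startswith_iff] at hsw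
  obtain ⟨t, ht⟩ := hsw
  rw [← ht, show "char".toList = ['c','h','a','r'] from by decide] at h0
  simp at h0
  exact hne (h0 ▸ rfl)

theorem pv_head_split (t1 t2 : String) :
    ("split " ++ t1 ++ " " ++ t2).toList.head? = some 's' := by
  simp [String.toList_append, show "split ".toList = ['s','p','l','i','t',' '] from by decide]

theorem pv_head_jmp (t : String) :
    ("jmp " ++ t).toList.head? = some 'j' := by
  simp [String.toList_append, show "jmp ".toList = ['j','m','p',' '] from by decide]

theorem pv_step (ins out : List String) (pending : Option String) (c : Char)
    (h : pvInv ins out pending) :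
    pvInv (pvStepA ins c) (pvStepB (out, pending) c).1 (pvStepB (out, pending) c).2 := by
  cases pending with
  | none =>
    obtain ⟨hins, hlast⟩ := h
    subst hins
    by_cases hab : c = 'a' ∨ c = 'b'
    · have hB : pvStepB (ins, none) c = (ins, some ("char " ++ String.ofList [c])) := by
        simp [pvStepB, hab]
      have hA : pvStepA ins c = ins ++ ["char " ++ String.ofList [c]] := by
        simp [pvStepA, hab]
      rw [hA, hB]
      refine ⟨rfl, ?_⟩
      rcases hab with hc | hc <;> subst hc
      · exact Or.inl (by decide)
      · exact Or.inr (by decide)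
    · have hB : pvStepB (ins, none) c = (ins, none) := by
        simp [pvStepB, hab]
      have hA : pvStepA ins c = ins := by
        simp only [pvStepA, hab, if_false]
        split_ifs <;>
          (cases hl : ins.getLast? with
           | none => simp
           | some t => (simp only [hlast t hl]; try simp))
      rw [hA, hB]
      exact ⟨rfl, hlast⟩
  | some p =>
    obtain ⟨hins, hp⟩ := h
    subst hins
    have hswp : PySem.Str.startswith p "char" = true := by
      rcases hp with h' | h' <;> subst h' <;> decide
    have hl : (out ++ [p]).getLast? = some p := by simp
    have hdrop : (out ++ [p]).dropLast = out := by simp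
    by_cases hab : c = 'a' ∨ c = 'b'
    · have hB : pvStepB (out, some p) c = (out ++ [p], some ("char " ++ String.ofList [c])) := by
        simp [pvStepB, hab]
      have hA : pvStepA (out ++ [p]) c = (out ++ [p]) ++ ["char " ++ String.ofList [c]] := by
        simp [pvStepA, hab]
      rw [hA, hB]
      refine ⟨rfl, ?_⟩
      rcases hab with hc | hc <;> subst hc
      · exact Or.inl (by decide)
      · exact Or.inr (by decide)
    · by_cases h1 : c = '+'
      · subst h1
        simp only [pvStepA, pvStepB]
        simp only [hl, hdrop, hswp]
        norm_num
        refine ⟨?_, ?_⟩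
        · rfl
        · intro t ht
          simp [List.getLast?_append] at ht
          exact pv_sw_head t 's' (ht ▸ pv_head_split _ _) (by decide)
      · by_cases h2 : c = '*'
        · subst h2
          simp only [pvStepA, pvStepB]
          simp only [hl, hdrop, hswp]
          norm_num
          refine ⟨?_, ?_⟩
          · rfl
          · intro t ht
            simp [List.getLast?_append] at ht
            exact pv_sw_head t 'j' (ht ▸ pv_head_jmp _) (by decide)
        · by_cases h3 : c = '?'
          · subst h3
            simp only [pvStepA, pvStepB]
            simp only [hl, hdrop, hswp]
            norm_num
            exact ⟨by simp [List.append_assoc], hp⟩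
          · by_cases h4 : c = '|'
            · subst h4
              simp only [pvStepA, pvStepB]
              simp only [hl, hdrop, hswp]
              norm_num
              refine ⟨?_, ?_⟩
              · rfl
              · intro t ht
                simp [List.getLast?_append] at ht
                exact pv_sw_head t 'j' (ht ▸ pv_head_jmp _) (by decide)
            · have hB : pvStepB (out, some p) c = (out, some p) := by
                simp [pvStepB, hab, h1, h2, h3, h4]
              have hA : pvStepA (out ++ [p]) c = out ++ [p] := by
                simp [pvStepA, hab, h1, h2, h3, h4]
              rw [hA, hB]
              exact ⟨rfl, hp⟩

theorem pv_loop (cs : List Char) : ∀ (ins out : List String) (pending : Option String),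
    pvInv ins out pending →
    pvInv (cs.foldl pvStepA ins) (cs.foldl pvStepB (out, pending)).1
      (cs.foldl pvStepB (out, pending)).2 := by
  induction cs with
  | nil => intro ins out pending h; exact h
  | cons c cs ih =>
    intro ins out pending h
    have := ih (pvStepA ins c) (pvStepB (out, pending) c).1 (pvStepB (out, pending) c).2
      (pv_step ins out pending c h)
    simpa using this

-- ===== VERDICT (by name: the statement is the Claim_ definition above) =====
theorem compile_regex_spec : Claim_equal_compile_regex := by
  intro regex _
  unfold Spec_compile_regex compile_regex compile_regex_alt
  have h := pv_loop regex.toList [] [] none ⟨rfl, by intro t ht; simp at ht⟩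
  set st := regex.toList.foldl pvStepB (([] : List String), (none : Option String)) with hst
  cases hp : st.2 with
  | some p =>
    unfold pvInv at h
    rw [hp] at h
    simp only [h.1, hp, List.append_assoc]
  | none =>
    unfold pvInv at h
    rw [hp] at h
    simp only [h.1, hp]
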